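-- pv_equiv track=rewrite | github.com/guruprerana/corewar | corewar.py | resolve_writes
-- ===== SOURCE A (Python) =====
-- def extract(w, m, n):
--     return (w >> m) % (0b1 << n)
--
-- def bit_set(w, i):
--     return w | (0b1 << i)
--
-- def bit_clear(w, i):
--     return w & (~ (0b1 << i))
--
-- def resolve_writes(base, xs):
--     for i in range(32):
--         zeroes = 0
--         ones = 0
--         for x in xs:
--             if extract(x, i, 1) == 0:
--                 zeroes += 1
--             else:
--                 ones += 1
--
--         if zeroes > ones:
--             base = bit_clear(base, i)
--         elif zeroes < ones:
--             base = bit_set(base, i)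
--
--     return base
-- ===== SOURCE B (Python) =====
-- def resolve_writes(base, xs):
--     # Bit-sliced (SWAR) vertical counters: counters[k] holds, in its bit i,
--     # the k-th binary digit of the count of elements whose bit i is set.
--     MOD = 1 << 32
--     counters = []
--     for x in xs:
--         carry = x % MOD
--         k = 0
--         while carry:
--             if k == len(counters):
--                 counters.append(0)
--             counters[k], carry = counters[k] ^ carry, counters[k] & carry
--             k += 1
--     n = len(xs)
--     for i in range(32):
--         ones = 0
--         for k, c in enumerate(counters):
--             ones += ((c >> i) & 1) << k
--         if 2 * ones > n:
--             base |= 1 << i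
--         elif 2 * ones < n:
--             base &= ~(1 << i)
--     return base
-- ===== Notes on version B (the rewrite author's own statement) =====
-- stated objective: faster
-- what changed: B replaces A's 32 per-bit counting scans of xs with bit-sliced (SWAR) vertical counters: each element is ripple-carry-added once into a small list of counter words whose bit i holds a binary digit of the count of set bits at position i, so all 32 bit-columns are tallied in parallel by whole-word ^/& operations; a final pass over the 32 bits reads each count off the counter columns and compares 2*ones with n.
import Mathlib
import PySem

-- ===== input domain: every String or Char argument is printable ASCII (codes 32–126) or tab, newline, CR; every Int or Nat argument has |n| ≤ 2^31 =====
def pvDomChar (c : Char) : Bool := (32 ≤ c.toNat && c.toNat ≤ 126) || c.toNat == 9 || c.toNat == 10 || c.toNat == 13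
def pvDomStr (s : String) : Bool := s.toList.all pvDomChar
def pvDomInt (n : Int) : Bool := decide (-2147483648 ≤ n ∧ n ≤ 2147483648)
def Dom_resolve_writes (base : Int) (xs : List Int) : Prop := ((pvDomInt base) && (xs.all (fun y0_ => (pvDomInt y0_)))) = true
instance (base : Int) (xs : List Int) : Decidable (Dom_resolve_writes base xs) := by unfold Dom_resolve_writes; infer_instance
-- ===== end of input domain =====

-- B replaces A's 32 per-bit counting scans of xs by bit-sliced (SWAR) vertical counters:
-- one ripple-carry add of each element into a list of counter words, all 32 bit-columns at once
-- (objective: faster by bit-parallelism, measured in a timing run).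

-- ===== PORT A =====
-- Python: (w >> m) % (0b1 << n); every call site has m, n ≥ 0, where .toNat is exact
def pvExtract (w : Int) (m : Int) (n : Int) : Int :=
  PySem.Int.mod (w >>> m.toNat) ((1 : Int) <<< n.toNat)

def pvBitSet (w : Int) (i : Int) : Int := PySem.Int.bor w ((1 : Int) <<< i.toNat)

def pvBitClear (w : Int) (i : Int) : Int := PySem.Int.band w (Int.not ((1 : Int) <<< i.toNat))

def resolve_writes (base : Int) (xs : List Int) : Int :=
  (PySem.List.pyRange 0 32 1).foldl (fun (b : Int) (i : Int) =>
    let zo := xs.foldl (fun (p : Int × Int) (x : Int) =>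
      if pvExtract x i 1 = 0 then (p.1 + 1, p.2) else (p.1, p.2 + 1)) (0, 0)
    if zo.1 > zo.2 then pvBitClear b i
    else if zo.1 < zo.2 then pvBitSet b i
    else b) base

-- ===== PORT B =====
-- the ripple-carry 'while carry:' loop of Source B: processed prefix is rebuilt, untouched
-- suffix kept; when the list is exhausted with carry ≠ 0 Python appends 0 and one more
-- step turns it into the carry itself
def pvAddCarry : Int → List Int → List Int
  | carry, [] => if carry = 0 then [] else [carry]
  | carry, c :: rest =>
    if carry = 0 then c :: rest
    else (PySem.Int.bxor c carry) :: pvAddCarry (PySem.Int.band c carry) rest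

def resolve_writes_alt (base : Int) (xs : List Int) : Int :=
  let counters : List Int :=
    xs.foldl (fun (cs : List Int) (x : Int) =>
      pvAddCarry (PySem.Int.mod x ((1 : Int) <<< 32)) cs) []
  let n : Int := PySem.List.len xs
  (PySem.List.pyRange 0 32 1).foldl (fun (b : Int) (i : Int) =>
    let ones : Int := (PySem.List.enumerate counters).foldl
      (fun (o : Int) (kc : Int × Int) =>
        o + (PySem.Int.band (kc.2 >>> i.toNat) 1 <<< kc.1.toNat)) 0
    if 2 * ones > n then PySem.Int.bor b ((1 : Int) <<< i.toNat)
    else if 2 * ones < n then PySem.Int.band b (Int.not ((1 : Int) <<< i.toNat))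
    else b) base

-- ===== PRECONDITION & SPEC =====
def Spec_resolve_writes (base : Int) (xs : List Int) (out : Int) : Prop := out = resolve_writes_alt base xs
instance (base : Int) (xs : List Int) (out : Int) : Decidable (Spec_resolve_writes base xs out) := by unfold Spec_resolve_writes; infer_instance

-- ===== CLAIM (what is proved, stated in full; the proofs are below) =====
def Claim_equal_resolve_writes : Prop := ∀ (base : Int) (xs : List Int), Dom_resolve_writes base xs → Spec_resolve_writes base xs (resolve_writes base xs)

-- ===== LEMMAS AND PROOFS =====

-- bit j of x (an Int that is 0 or 1)
def pvBit (j : Nat) (x : Int) : Int := PySem.Int.band (x >>> j) 1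

-- number of elements of xs with bit j set
def pvCnt (j : Nat) (xs : List Int) : Int := (xs.map (pvBit j)).sum

-- the number whose binary digits are the bits at column j of the counter words
def pvVal (j : Nat) (cs : List Int) : Int := cs.foldr (fun c acc => pvBit j c + 2 * acc) 0

lemma pvBit_eq_mod (j : Nat) (x : Int) : pvBit j x = PySem.Int.mod (x >>> j) 2 := by
  rw [pvBit, PySem.Int.band_one]

lemma pvBit_cases (j : Nat) (x : Int) : pvBit j x = 0 ∨ pvBit j x = 1 := by
  have h1 := PySem.Int.mod_nonneg (x >>> j) (b := 2) (by omega)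
  have h2 := PySem.Int.mod_lt (x >>> j) (b := 2) (by omega)
  rw [pvBit_eq_mod]
  omega

lemma pvBit_zero (j : Nat) : pvBit j 0 = 0 := by
  rw [pvBit_eq_mod]
  simp [PySem.Int.mod]

-- A's inner scan: the zeroes/ones tallies in terms of the ones-count
lemma innerA_eq (j : Nat) : ∀ (xs : List Int) (z o : Int),
    xs.foldl (fun (p : Int × Int) (x : Int) =>
      if PySem.Int.mod (x >>> j) 2 = 0 then (p.1 + 1, p.2) else (p.1, p.2 + 1)) (z, o)
    = (z + ((xs.length : Int) - pvCnt j xs), o + pvCnt j xs) := by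
  intro xs
  induction xs with
  | nil => intro z o; simp [pvCnt]
  | cons x xs ih =>
    intro z o
    have hb := pvBit_cases j x
    rw [pvBit_eq_mod] at hb
    simp only [List.foldl_cons]
    rcases hb with h | h
    · rw [if_pos h, ih]
      simp only [pvCnt, List.map_cons, List.sum_cons, pvBit_eq_mod, h, List.length_cons]
      rw [Prod.mk.injEq]
      constructor <;> push_cast <;> ring
    · rw [if_neg (by omega), ih]
      simp only [pvCnt, List.map_cons, List.sum_cons, pvBit_eq_mod, h, List.length_cons]
      rw [Prod.mk.injEq]
      constructor <;> push_cast <;> ring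

-- bit j, for a nonnegative Int, through Nat
lemma pvBit_nonneg (j : Nat) (c : Int) (hc : 0 ≤ c) :
    pvBit j c = ((c.toNat / 2 ^ j % 2 : Nat) : Int) := by
  have hcast : c = ((c.toNat : Nat) : Int) := (Int.toNat_of_nonneg hc).symm
  rw [pvBit, hcast]
  rw [← Int.natCast_shiftRight]
  rw [show ((1 : Int)) = ((1 : Nat) : Int) from rfl, PySem.Int.band_natCast]
  rw [Nat.and_one_is_mod, Nat.shiftRight_eq_div_pow]
  simp

-- digit-of-quotient expressed through testBit
lemma natBit_testBit (m j : Nat) : m / 2 ^ j % 2 = if m.testBit j then 1 else 0 := by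
  rw [Nat.testBit_eq_decide_div_mod_eq]
  have : m / 2 ^ j % 2 < 2 := Nat.mod_lt _ (by norm_num)
  by_cases h : m / 2 ^ j % 2 = 1
  · simp [h]
  · simp [h]; omega

-- full-adder identity on one bit column: xor carries the sum bit, and carries the carry bit
lemma pvBit_xor_and (j : Nat) (c d : Int) (hc : 0 ≤ c) (hd : 0 ≤ d) :
    pvBit j (PySem.Int.bxor c d) + 2 * pvBit j (PySem.Int.band c d) = pvBit j c + pvBit j d := by
  rw [PySem.Int.bxor_of_nonneg hc hd, PySem.Int.band_of_nonneg hc hd]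
  rw [pvBit_nonneg j _ (Int.natCast_nonneg _), pvBit_nonneg j _ (Int.natCast_nonneg _),
    pvBit_nonneg j c hc, pvBit_nonneg j d hd]
  rw [Int.toNat_natCast, Int.toNat_natCast]
  rw [natBit_testBit, natBit_testBit, natBit_testBit, natBit_testBit,
    Nat.testBit_xor, Nat.testBit_and]
  cases hb1 : c.toNat.testBit j <;> cases hb2 : d.toNat.testBit j <;> simp

lemma bxor_nonneg (c d : Int) (hc : 0 ≤ c) (hd : 0 ≤ d) : 0 ≤ PySem.Int.bxor c d := by
  rw [PySem.Int.bxor_of_nonneg hc hd]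
  exact Int.natCast_nonneg _

-- the ripple-carry add: adds bit j of the carry into column j, preserves nonnegativity
lemma pvAddCarry_spec (j : Nat) : ∀ (cs : List Int) (carry : Int), 0 ≤ carry →
    (∀ c ∈ cs, 0 ≤ c) →
    ((∀ c ∈ pvAddCarry carry cs, 0 ≤ c) ∧
     pvVal j (pvAddCarry carry cs) = pvVal j cs + pvBit j carry) := by
  intro cs
  induction cs with
  | nil =>
    intro carry hcar _
    by_cases h : carry = 0
    · subst h
      simp [pvAddCarry, pvVal, pvBit_zero]
    · rw [pvAddCarry, if_neg h]
      refine ⟨by simpa using hcar, ?_⟩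
      simp [pvVal]
  | cons c rest ih =>
    intro carry hcar hall
    by_cases h : carry = 0
    · subst h
      rw [pvAddCarry, if_pos rfl]
      exact ⟨hall, by simp [pvBit_zero]⟩
    · rw [pvAddCarry, if_neg h]
      have hc : 0 ≤ c := hall c (by simp)
      have hrest : ∀ a ∈ rest, 0 ≤ a := fun a ha => hall a (by simp [ha])
      have hband : 0 ≤ PySem.Int.band c carry :=
        PySem.Int.band_nonneg_of_nonneg_left carry hc
      obtain ⟨hnn, hval⟩ := ih (PySem.Int.band c carry) hband hrest
      constructor
      · intro a ha
        rcases List.mem_cons.mp ha with rfl | ha'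
        · exact bxor_nonneg c carry hc hcar
        · exact hnn a ha'
      · simp only [pvVal, List.foldr_cons] at *
        rw [hval]
        have := pvBit_xor_and j c carry hc hcar
        ring_nf
        ring_nf at this
        omega

-- reduction modulo 2^32 keeps bits below 32
lemma pvBit_mod (j : Nat) (hj : j < 32) (x : Int) :
    pvBit j (PySem.Int.mod x ((1 : Int) <<< 32)) = pvBit j x := by
  have hM : ((1 : Int) <<< 32) = 4294967296 := by decide
  rw [hM, pvBit_eq_mod, pvBit_eq_mod,
    PySem.Int.mod_eq_emod_of_pos (b := (4294967296 : Int)) (by norm_num),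
    PySem.Int.mod_eq_emod_of_pos (by norm_num),
    PySem.Int.mod_eq_emod_of_pos (by norm_num)]
  rw [Int.shiftRight_eq_div_pow, Int.shiftRight_eq_div_pow]
  push_cast
  set q := x / 4294967296 with hq
  set p := (2 : Int) ^ (31 - j) * q with hp
  have h32 : (31 - j) + 1 + j = 32 := by omega
  have hpow : (2 : Int) ^ (31 - j) * 2 * 2 ^ j = 4294967296 := by
    have hsplit : (2 : Int) ^ ((31 - j) + 1 + j) = 2 ^ (31 - j) * 2 * 2 ^ j := by
      rw [pow_add, pow_add, pow_one]
    rw [← hsplit, h32]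
    norm_num
  have hx : x % 4294967296 = x + (-(p * 2)) * 2 ^ j := by
    rw [Int.emod_def, hp]
    linear_combination q * hpow
  rw [hx, Int.add_mul_ediv_right _ _ (show (2 : Int) ^ j ≠ 0 by positivity)]
  omega

-- the whole first pass: column j of the counter table is the ones-count of bit j
lemma counters_spec (j : Nat) : ∀ (xs : List Int) (cs : List Int), (∀ c ∈ cs, 0 ≤ c) →
    ((∀ c ∈ xs.foldl (fun (cs : List Int) (x : Int) =>
        pvAddCarry (PySem.Int.mod x ((1 : Int) <<< 32)) cs) cs, 0 ≤ c) ∧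
     pvVal j (xs.foldl (fun (cs : List Int) (x : Int) =>
        pvAddCarry (PySem.Int.mod x ((1 : Int) <<< 32)) cs) cs)
      = pvVal j cs + (xs.map (fun x => pvBit j (PySem.Int.mod x ((1 : Int) <<< 32)))).sum) := by
  intro xs
  induction xs with
  | nil => intro cs h; exact ⟨by simpa using h, by simp⟩
  | cons x xs ih =>
    intro cs h
    have hmod : 0 ≤ PySem.Int.mod x ((1 : Int) <<< 32) := by
      apply PySem.Int.mod_nonneg
      decide
    obtain ⟨hnn, hval⟩ := pvAddCarry_spec j cs (PySem.Int.mod x ((1 : Int) <<< 32)) hmod h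
    obtain ⟨hnn', hval'⟩ := ih _ hnn
    simp only [List.foldl_cons]
    refine ⟨hnn', ?_⟩
    rw [hval', hval]
    simp only [List.map_cons, List.sum_cons]
    ring

-- B's second-phase inner loop: the enumerate-fold reads off column j as pvVal
lemma enum_sum (j : Nat) : ∀ (cs : List Int) (s : Nat) (o : Int),
    (PySem.List.enumerate cs (s : Int)).foldl
      (fun (o : Int) (kc : Int × Int) =>
        o + (PySem.Int.band (kc.2 >>> j) 1 <<< kc.1.toNat)) o
    = o + 2 ^ s * pvVal j cs := by
  intro cs
  induction cs with
  | nil => intro s o; simp [PySem.List.enumerate_nil, pvVal]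
  | cons c rest ih =>
    intro s o
    rw [PySem.List.enumerate_cons, List.foldl_cons]
    have hs1 : ((s : Int) + 1) = ((s + 1 : Nat) : Int) := by push_cast; ring
    rw [hs1, ih (s + 1)]
    simp only [pvVal, List.foldr_cons]
    rw [Int.shiftLeft_eq]
    simp only [Int.toNat_natCast]
    rw [show PySem.Int.band (c >>> j) 1 = pvBit j c from rfl]
    rw [pow_succ]
    ring

-- ===== VERDICT (by name: the statement is the Claim_ definition above) =====
set_option maxHeartbeats 1000000 in
theorem resolve_writes_spec : Claim_equal_resolve_writes := by
  intro base xs _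
  unfold Spec_resolve_writes resolve_writes resolve_writes_alt
  obtain ⟨hnn, -⟩ := counters_spec 0 xs [] (by simp)
  apply PySem.List.foldl_congr_mem
  intro b i hi
  rw [PySem.List.mem_pyRange_one] at hi
  have hnat : i.toNat < 32 := by omega
  have hextract : ∀ x : Int, pvExtract x i 1 = PySem.Int.mod (x >>> i.toNat) 2 := fun x => rfl
  simp only [hextract]
  rw [innerA_eq i.toNat xs 0 0]
  have hones : (PySem.List.enumerate
        (xs.foldl (fun (cs : List Int) (x : Int) =>
          pvAddCarry (PySem.Int.mod x ((1 : Int) <<< 32)) cs) []) ((0 : Nat) : Int)).foldl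
      (fun (o : Int) (kc : Int × Int) =>
        o + (PySem.Int.band (kc.2 >>> i.toNat) 1 <<< kc.1.toNat)) 0
      = pvCnt i.toNat xs := by
    rw [enum_sum]
    obtain ⟨-, hval⟩ := counters_spec i.toNat xs [] (by simp)
    rw [hval]
    simp only [pvVal, List.foldr_nil, pow_zero, one_mul, zero_add]
    unfold pvCnt
    congr 1
    exact List.map_congr_left (fun x _ => pvBit_mod i.toNat hnat x)
  rw [show ((0 : Nat) : Int) = (0 : Int) from rfl] at hones
  simp only [hones, PySem.List.len_eq, zero_add]
  set c := pvCnt i.toNat xs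
  by_cases h1 : (xs.length : Int) - c > c
  · rw [if_pos h1, if_neg (by omega), if_pos (by omega)]
    rfl
  · rw [if_neg h1]
    by_cases h2 : (xs.length : Int) - c < c
    · rw [if_pos h2, if_pos (by omega)]
      rfl
    · rw [if_neg h2, if_neg (by omega), if_neg (by omega)]
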